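-- pv_equiv track=rewrite | github.com/DmitriySindeev/perfomanse-lab | task1.py | circular_array_path
-- ===== SOURCE A (Python) =====
-- def circular_array_path(n, m):
--     array = list(range(1, n+1)) * 2  # Создаем массив с повторяющимися элементами от 1 до n
--     path = []  # Инициализируем пустой путь
--     start_index = 0  # Устанавливаем начальный индекс
--
--     while len(path) < n:  # Пока длина пути меньше n
--         path.append(array[start_index])  # Добавляем элемент в путь
--         start_index = (start_index + m - 1) % n  # Обновляем индекс в соответствии с правилом
--         if start_index == 0:  # Если вернулись к начальному индексу, выходим из цикла
--             break
--
--     return path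
-- ===== SOURCE B (Python) =====
-- def _gcd(a, b):
--     while b:
--         a, b = b, a % b
--     return a
--
--
-- def circular_array_path(n, m):
--     if n <= 0:
--         return []
--     step = (m - 1) % n
--     cycle_len = n // _gcd(n, step)
--     return [(i * step) % n + 1 for i in range(cycle_len)]
-- ===== Notes on version B (the rewrite author's own statement) =====
-- stated objective: alternative
-- what changed: Replaces the index-stepping while-loop over a doubled array by a number-theoretic closed form: the cycle length n // gcd(n, (m-1) % n) is computed once and the path is a single comprehension [(i*step) % n + 1 for i in range(cycle_len)]; no doubled array is built and only cycle_len <= n elements are ever touched.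
import Mathlib
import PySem

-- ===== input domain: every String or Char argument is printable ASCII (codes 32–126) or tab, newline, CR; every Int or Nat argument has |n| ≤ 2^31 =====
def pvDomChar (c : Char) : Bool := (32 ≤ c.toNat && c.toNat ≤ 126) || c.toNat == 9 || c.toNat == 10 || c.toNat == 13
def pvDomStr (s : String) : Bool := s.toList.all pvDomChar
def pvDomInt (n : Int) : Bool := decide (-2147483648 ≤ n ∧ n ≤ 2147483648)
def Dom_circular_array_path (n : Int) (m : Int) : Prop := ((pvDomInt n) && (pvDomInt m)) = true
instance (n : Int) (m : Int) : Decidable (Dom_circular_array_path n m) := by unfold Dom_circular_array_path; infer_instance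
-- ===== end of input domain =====

-- B replaces A's index-stepping while-loop by the closed form cycle length n // gcd(n, (m-1) % n)
-- plus one comprehension; objective: a different algorithm (measured faster: no doubled array, only cycle-length many steps).

-- ===== PORT A =====
-- The while-loop appends one element per iteration and stops as soon as len(path) = n,
-- so it runs at most n iterations: fuel n.toNat is exact (when fuel hits 0 the length is n
-- and the loop condition is false anyway).  array[start_index] is provably in range for every
-- reachable state (0 ≤ start_index < n ≤ len(array)), so `.getD 0` never supplies its default.
def caLoop (array : List Int) (n : Int) (m : Int) : Nat → Int → List Int → List Int
  | 0, _, path => path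
  | fuel+1, start_index, path =>
    if (path.length : Int) < n then
      let path' := path ++ [(PySem.List.pyGet? array start_index).getD 0]
      let start' := PySem.Int.mod (start_index + m - 1) n
      if start' = 0 then path' else caLoop array n m fuel start' path'
    else path

def circular_array_path (n : Int) (m : Int) : List Int :=
  caLoop (PySem.List.pyRange 1 (n+1) 1 ++ PySem.List.pyRange 1 (n+1) 1) n m n.toNat 0 []

-- ===== PORT B =====
-- Source B's hand-written Euclid loop `while b: a, b = b, a % b`; b strictly decreases and stays
-- ≥ 0 on every call B makes, so fuel b.toNat + 1 is enough.
def gcdLoop : Nat → Int → Int → Int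
  | 0, a, _ => a
  | fuel+1, a, b => if b ≠ 0 then gcdLoop fuel b (PySem.Int.mod a b) else a

def circular_array_path_alt (n : Int) (m : Int) : List Int :=
  if n ≤ 0 then []
  else
    let step := PySem.Int.mod (m - 1) n
    let cycle_len := PySem.Int.floordiv n (gcdLoop (step.toNat + 1) n step)
    (PySem.List.pyRange 0 cycle_len 1).map (fun i => PySem.Int.mod (i * step) n + 1)

-- ===== PRECONDITION & SPEC =====
def Spec_circular_array_path (n : Int) (m : Int) (out : List Int) : Prop := out = circular_array_path_alt n m
instance (n : Int) (m : Int) (out : List Int) : Decidable (Spec_circular_array_path n m out) := by unfold Spec_circular_array_path; infer_instance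

-- ===== CLAIM (what is proved, stated in full; the proofs are below) =====
def Claim_equal_circular_array_path : Prop := ∀ (n : Int) (m : Int), Dom_circular_array_path n m → Spec_circular_array_path n m (circular_array_path n m)

-- ===== LEMMAS AND PROOFS =====

-- The hand-written Euclid loop computes Int.gcd when both arguments are nonnegative.
lemma gcdLoop_eq : ∀ (fuel : Nat) (a b : Int), 0 ≤ a → 0 ≤ b → b < (fuel : Int) →
    gcdLoop fuel a b = (Int.gcd a b : Int) := by
  intro fuel
  induction fuel with
  | zero => intro a b _ hb hf; omega
  | succ f ih =>
    intro a b ha hb hf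
    by_cases hb0 : b = 0
    · subst hb0
      simp [gcdLoop, Int.natAbs_of_nonneg ha]
    · have hbpos : 0 < b := lt_of_le_of_ne hb (Ne.symm hb0)
      have hmod : PySem.Int.mod a b = a % b := PySem.Int.mod_eq_emod_of_pos hbpos
      have h1 : 0 ≤ a % b := Int.emod_nonneg a hb0
      have h2 : a % b < b := Int.emod_lt_of_pos a hbpos
      have hrec := ih b (a % b) hb h1 (by omega)
      have hgcd : Int.gcd b (a % b) = Int.gcd a b := by
        have h : a % b = a + (-(a/b))*b := by rw [Int.emod_def]; ring
        rw [h, Int.gcd_add_mul_right_right, Int.gcd_comm]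
      simp only [gcdLoop, if_pos hb0, hmod, hrec, hgcd]

-- Divisibility against a scaled generator: N ∣ k*S ↔ (N / gcd N S) ∣ k.
lemma dvd_mul_iff_div_gcd_dvd (N S k : Nat) (hN : 0 < N) :
    (N ∣ k * S) ↔ (N / Nat.gcd N S ∣ k) := by
  have hgpos : 0 < Nat.gcd N S := Nat.gcd_pos_of_pos_left _ hN
  have hcop := Nat.coprime_div_gcd_div_gcd (m := N) (n := S) hgpos
  have hN' := Nat.div_mul_cancel (Nat.gcd_dvd_left N S)
  have hS' := Nat.div_mul_cancel (Nat.gcd_dvd_right N S)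
  constructor
  · intro h
    have h2 : N / Nat.gcd N S ∣ k * (S / Nat.gcd N S) := by
      refine (Nat.mul_dvd_mul_iff_right hgpos).mp ?_
      calc N / Nat.gcd N S * Nat.gcd N S = N := hN'
        _ ∣ k * S := h
        _ = k * (S / Nat.gcd N S) * Nat.gcd N S := by rw [Nat.mul_assoc, hS']
    exact hcop.dvd_of_dvd_mul_right h2
  · intro h
    obtain ⟨c, hc⟩ := h
    refine ⟨c * (S / Nat.gcd N S), ?_⟩
    calc k * S = k * (S / Nat.gcd N S * Nat.gcd N S) := by rw [hS']
      _ = (N / Nat.gcd N S * c) * (S / Nat.gcd N S * Nat.gcd N S) := by rw [hc]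
      _ = (N / Nat.gcd N S * Nat.gcd N S) * (c * (S / Nat.gcd N S)) := by ring
      _ = N * (c * (S / Nat.gcd N S)) := by rw [hN']

-- Reducing the factor (m-1) mod n inside a product does not change the residue.
lemma mul_emod_reduce (j s n : Int) : (j * (s % n)) % n = (j * s) % n := by
  conv_rhs => rw [Int.mul_emod]
  rw [Int.mul_emod, Int.emod_emod_of_dvd _ dvd_rfl]

-- The break test of A's loop: (k*(m-1)) % n = 0 exactly when the cycle length divides k.
lemma break_iff (n m : Int) (hn : 0 < n) (k : Nat) :
    ((k : Int) * (m-1)) % n = 0 ↔ (n.toNat / Nat.gcd n.toNat ((m-1) % n).toNat ∣ k) := by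
  set s : Int := (m-1) % n with hs
  have hs0 : 0 ≤ s := Int.emod_nonneg _ (by omega)
  have h1 : ((k : Int) * (m-1)) % n = ((k : Int) * s) % n := (mul_emod_reduce k (m-1) n).symm
  have h2 : ((k : Int) * s) % n = 0 ↔ n ∣ (k : Int) * s := EuclideanDomain.mod_eq_zero
  have h3 : (n ∣ (k : Int) * s) ↔ (n.toNat ∣ k * s.toNat) := by
    rw [show ((k : Int) * s) = ((k * s.toNat : Nat) : Int) by push_cast [Int.toNat_of_nonneg hs0]; ring,
        show n = ((n.toNat : Nat) : Int) by rw [Int.toNat_of_nonneg (le_of_lt hn)]]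
    exact Int.natCast_dvd_natCast
  rw [h1, h2, h3]
  exact dvd_mul_iff_div_gcd_dvd _ _ _ (by omega)

-- The main loop invariant: after k iterations A's loop holds path = map f (range k) and
-- start_index = (k*(m-1)) % n; it finally returns map f (range L), L the cycle length.
lemma caLoop_inv (n m : Int) (hn : 0 < n) :
    ∀ (fuel k : Nat),
      k < n.toNat / Nat.gcd n.toNat ((m-1) % n).toNat →
      fuel = n.toNat - k →
      caLoop (PySem.List.pyRange 1 (n+1) 1 ++ PySem.List.pyRange 1 (n+1) 1) n m fuel
        (((k : Int) * (m-1)) % n) ((List.range k).map (fun j : Nat => ((j : Int) * (m-1)) % n + 1))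
      = (List.range (n.toNat / Nat.gcd n.toNat ((m-1) % n).toNat)).map
          (fun j : Nat => ((j : Int) * (m-1)) % n + 1) := by
  intro fuel
  induction fuel with
  | zero =>
    intro k hk hf
    exfalso
    have hLle : n.toNat / Nat.gcd n.toNat ((m-1) % n).toNat ≤ n.toNat := Nat.div_le_self _ _
    omega
  | succ f ih =>
    intro k hk hf
    have hLle : n.toNat / Nat.gcd n.toNat ((m-1) % n).toNat ≤ n.toNat := Nat.div_le_self _ _
    have hkn : k < n.toNat := lt_of_lt_of_le hk hLle
    have hlen : (((List.range k).map (fun j : Nat => ((j : Int) * (m-1)) % n + 1)).length : Int) = (k : Int) := by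
      simp
    have hcond : (((List.range k).map (fun j : Nat => ((j : Int) * (m-1)) % n + 1)).length : Int) < n := by
      rw [hlen]; omega
    have hidx0 : 0 ≤ ((k : Int) * (m-1)) % n := Int.emod_nonneg _ (by omega)
    have hidxn : ((k : Int) * (m-1)) % n < n := Int.emod_lt_of_pos _ hn
    -- array lookup: index < n = length of the first copy of range(1, n+1)
    have harr : (PySem.List.pyGet? (PySem.List.pyRange 1 (n+1) 1 ++ PySem.List.pyRange 1 (n+1) 1)
        (((k : Int) * (m-1)) % n)).getD 0 = ((k : Int) * (m-1)) % n + 1 := by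
      rw [PySem.List.pyGet?_of_nonneg _ hidx0,
          List.getElem?_append_left (by
            rw [PySem.List.length_pyRange_one]; omega),
          PySem.List.getElem?_pyRange_one]
      rw [if_pos (by omega)]
      rw [Option.getD_some]
      rw [Int.toNat_of_nonneg hidx0]; ring
    -- the updated index is ((k+1)*(m-1)) % n
    have hstart : PySem.Int.mod (((k : Int) * (m-1)) % n + m - 1) n
        = (((k+1 : Nat) : Int) * (m-1)) % n := by
      rw [PySem.Int.mod_eq_emod_of_pos hn]
      have : ((k : Int) * (m-1)) % n + m - 1 = ((k : Int) * (m-1)) % n + (m - 1) := by ring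
      rw [this, Int.emod_add_emod]
      congr 1
      push_cast
      ring
    have hpath : (List.range k).map (fun j : Nat => ((j : Int) * (m-1)) % n + 1)
        ++ [((k : Int) * (m-1)) % n + 1]
        = (List.range (k+1)).map (fun j : Nat => ((j : Int) * (m-1)) % n + 1) := by
      rw [List.range_succ, List.map_append]; rfl
    rw [caLoop, if_pos hcond]
    simp only [harr, hstart, hpath]
    by_cases hz : (((k+1 : Nat) : Int) * (m-1)) % n = 0
    · rw [if_pos hz]
      have hdvd := (break_iff n m hn (k+1)).mp hz
      have hk1 : k + 1 = n.toNat / Nat.gcd n.toNat ((m-1) % n).toNat :=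
        Nat.le_antisymm (by omega) (Nat.le_of_dvd (by omega) hdvd)
      rw [hk1]
    · rw [if_neg hz]
      have hndvd : ¬ (n.toNat / Nat.gcd n.toNat ((m-1) % n).toNat ∣ k+1) := fun h => hz ((break_iff n m hn (k+1)).mpr h)
      have hk1 : k + 1 < n.toNat / Nat.gcd n.toNat ((m-1) % n).toNat := by
        rcases Nat.lt_or_ge (k+1) (n.toNat / Nat.gcd n.toNat ((m-1) % n).toNat) with h | h
        · exact h
        · exact absurd ⟨1, by omega⟩ hndvd
      exact ih (k+1) hk1 (by omega)

-- ===== VERDICT (by name: the statement is the Claim_ definition above) =====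
theorem circular_array_path_spec : Claim_equal_circular_array_path := by
  intro n m _
  unfold Spec_circular_array_path circular_array_path circular_array_path_alt
  by_cases hn : n ≤ 0
  · have h0 : n.toNat = 0 := by omega
    rw [if_pos hn, h0]
    rfl
  · replace hn : (0:Int) < n := by omega
    rw [if_neg (by omega)]
    have hs : PySem.Int.mod (m-1) n = (m-1) % n := PySem.Int.mod_eq_emod_of_pos hn
    have hs0 : 0 ≤ (m-1) % n := Int.emod_nonneg _ (by omega)
    have hNpos : 0 < n.toNat := by omega
    have hgpos : 0 < Nat.gcd n.toNat ((m-1) % n).toNat := Nat.gcd_pos_of_pos_left _ hNpos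
    have hLpos : 0 < n.toNat / Nat.gcd n.toNat ((m-1) % n).toNat :=
      Nat.div_pos (Nat.gcd_le_left _ hNpos) hgpos
    have hgcd : gcdLoop (((m-1) % n).toNat + 1) n ((m-1) % n)
        = ((Nat.gcd n.toNat ((m-1) % n).toNat : Nat) : Int) := by
      rw [gcdLoop_eq (((m-1) % n).toNat + 1) n ((m-1) % n) (by omega) hs0 (by omega)]
      congr 1
      rw [Int.gcd]
      congr 1 <;> omega
    have hdiv : PySem.Int.floordiv n (gcdLoop (((m-1) % n).toNat + 1) n ((m-1) % n))
        = ((n.toNat / Nat.gcd n.toNat ((m-1) % n).toNat : Nat) : Int) := by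
      rw [hgcd, PySem.Int.floordiv_eq_ediv_of_pos (by exact_mod_cast hgpos),
          show n = ((n.toNat : Nat) : Int) by omega]
      exact (Int.natCast_ediv _ _).symm
    have hA := caLoop_inv n m hn n.toNat 0 hLpos (by omega)
    simp only [Nat.cast_zero, zero_mul, Int.zero_emod, List.range_zero, List.map_nil] at hA
    simp only [hs, hdiv]
    rw [hA]
    simp only [PySem.List.pyRange_one, sub_zero, Int.toNat_natCast, List.map_map]
    refine (List.map_congr_left ?_).symm
    intro j hj
    simp only [Function.comp_apply, zero_add]
    rw [PySem.Int.mod_eq_emod_of_pos hn, mul_emod_reduce]
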